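-- pv_equiv track=rewrite | github.com/reconfigurable-ml-pipeline/ipa | prediction-modules/evaluation.py | get_x_y
-- ===== SOURCE A (Python) =====
-- def get_x_y(data):
--     """
--     For each 60 seconds it taeks the max of last 60 seconds
--     and returns an output with length of len(data)/60 that
--     each entry is the maximum rps in each aggregated 60 seconds
--     x: series of max of every 1 minute
--     y: target of the 10 minutes
--     """
--     x = []
--     y = []
--     history_seconds = 120
--     step = 10
--     for i in range(0, len(data) - history_seconds, step):
--         t = data[i : i + history_seconds]
--         for j in range(0, len(t), step):
--             x.append(max(t[j : j + step]))
--         y.append(max(data[i + history_seconds : i + history_seconds + 2 * step]))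
--     return x, y
-- ===== SOURCE B (Python) =====
-- def get_x_y(data):
--     # Precompute each aligned 10-element block maximum once, then read 12 of
--     # them per window for x and combine two for y (O(n) instead of O(n * 12)).
--     n = len(data)
--     m = [max(data[k : k + 10]) for k in range(0, n, 10)]
--     x = []
--     y = []
--     for q in range((n - 111) // 10):
--         x.extend(m[q : q + 12])
--         y.append(m[q + 12] if q + 13 >= len(m) else max(m[q + 12], m[q + 13]))
--     return x, y
-- ===== Notes on version B (the rewrite author's own statement) =====
-- stated objective: faster
-- what changed: B precomputes the maximum of every aligned 10-element block once and then assembles each window's 12 x-values and each y-value by reading (and for y, combining two of) these precomputed block maxima, instead of rescanning the overlapping 120-element window and the 20-element target slice for every step.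
import Mathlib
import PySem

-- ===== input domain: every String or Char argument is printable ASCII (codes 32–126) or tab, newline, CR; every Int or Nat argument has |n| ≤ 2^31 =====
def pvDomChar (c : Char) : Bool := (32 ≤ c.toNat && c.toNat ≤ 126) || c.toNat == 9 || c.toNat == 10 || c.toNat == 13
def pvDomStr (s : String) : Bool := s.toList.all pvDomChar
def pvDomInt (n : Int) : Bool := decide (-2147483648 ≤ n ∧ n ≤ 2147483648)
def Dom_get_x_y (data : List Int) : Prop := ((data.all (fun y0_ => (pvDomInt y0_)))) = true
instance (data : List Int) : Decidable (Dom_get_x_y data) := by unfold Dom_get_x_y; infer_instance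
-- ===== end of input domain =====

-- B precomputes every aligned 10-element block maximum once and reads those per window,
-- instead of rescanning each overlapping 120-element window; objective: faster (constant factor).

-- Python max(l); A and B only ever apply it to nonempty slices, so the 0 default is never used.
def pyMax (l : List Int) : Int := (PySem.List.max? l (fun y => y)).getD 0

-- ===== PORT A =====
def get_x_y (data : List Int) : List Int × List Int :=
  (PySem.List.pyRange 0 ((data.length : Int) - 120) 10).foldl
    (fun xy i =>
      let t := PySem.List.slice data (some i) (some (i + 120))
      let x' := (PySem.List.pyRange 0 ((t.length : Int)) 10).foldl
        (fun x j => x ++ [pyMax (PySem.List.slice t (some j) (some (j + 10)))]) xy.1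
      (x', xy.2 ++ [pyMax (PySem.List.slice data (some (i + 120)) (some (i + 120 + 2 * 10)))]))
    ([], [])

-- ===== PORT B =====
def get_x_y_alt (data : List Int) : List Int × List Int :=
  let n : Int := data.length
  let m := (PySem.List.pyRange 0 n 10).map
    (fun k => pyMax (PySem.List.slice data (some k) (some (k + 10))))
  (PySem.List.pyRange 0 (PySem.Int.floordiv (n - 111) 10) 1).foldl
    (fun xy q =>
      (xy.1 ++ PySem.List.slice m (some q) (some (q + 12)),
       xy.2 ++ [if q + 13 ≥ (m.length : Int) then PySem.List.pyGetD m (q + 12) 0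
                else max (PySem.List.pyGetD m (q + 12) 0) (PySem.List.pyGetD m (q + 13) 0)]))
    ([], [])

-- ===== PRECONDITION & SPEC =====
def Spec_get_x_y (data : List Int) (out : List Int × List Int) : Prop := out = get_x_y_alt data
instance (data : List Int) (out : List Int × List Int) : Decidable (Spec_get_x_y data out) := by unfold Spec_get_x_y; infer_instance

-- ===== CLAIM (what is proved, stated in full; the proofs are below) =====
def Claim_equal_get_x_y : Prop := ∀ (data : List Int), Dom_get_x_y data → Spec_get_x_y data (get_x_y data)

-- ===== LEMMAS AND PROOFS =====

-- block maximum of the k-th aligned 10-element block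
def bM (data : List Int) (k : Nat) : Int := pyMax ((data.drop (10 * k)).take 10)
-- number of windows / number of blocks
def nW (data : List Int) : Nat := (data.length - 111) / 10
def nB (data : List Int) : Nat := (data.length + 9) / 10
def chunk (data : List Int) (q : Nat) : List Int := (List.range 12).map (fun r => bM data (q + r))
def yV (data : List Int) (q : Nat) : Int :=
  if 10 * q + 130 < data.length then max (bM data (q + 12)) (bM data (q + 13)) else bM data (q + 12)
def ref (data : List Int) : List Int × List Int :=
  ((List.range (nW data)).flatMap (chunk data), (List.range (nW data)).map (yV data))

lemma foldl_pair {α : Type} (L : List α) (F : List Int × List Int → α → List Int × List Int)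
    (f : α → List Int) (g : α → Int)
    (h : ∀ p a, a ∈ L → F p a = (p.1 ++ f a, p.2 ++ [g a])) (p : List Int × List Int) :
    L.foldl F p = (p.1 ++ L.flatMap f, p.2 ++ L.map g) := by
  induction L generalizing p with
  | nil => simp
  | cons a L ih =>
    simp only [List.foldl_cons, List.flatMap_cons, List.map_cons]
    rw [h p a (by simp), ih]
    · simp
    · intro p' a' ha'; exact h p' a' (by simp [ha'])

lemma pyRange_ten (b : Int) :
    PySem.List.pyRange 0 b 10 = (List.range (((b + 9) / 10).toNat)).map (fun (k : Nat) => 10 * (k : Int)) := by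
  rw [PySem.List.pyRange_of_pos 0 b (by norm_num)]
  have h : (if (0:Int) < b then ((b - 0 + 10 - 1) / 10).toNat else 0) = ((b + 9) / 10).toNat := by
    split_ifs <;> omega
  rw [h]
  apply List.map_congr_left
  intro k _
  ring

lemma pyMax_cons (x : Int) (t : List Int) : pyMax (x :: t) = t.foldl max x := by
  simp [pyMax, PySem.List.max?_id_cons]

lemma pyMax_append (a b : List Int) (ha : a ≠ []) (hb : b ≠ []) :
    pyMax (a ++ b) = max (pyMax a) (pyMax b) := by
  cases a with
  | nil => exact absurd rfl ha
  | cons x t =>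
    cases b with
    | nil => exact absurd rfl hb
    | cons y u =>
      rw [List.cons_append, pyMax_cons, pyMax_cons, pyMax_cons, List.foldl_append,
        List.foldl_cons, List.foldl_assoc]

lemma slice_nat (xs : List Int) (a b : Nat) :
    PySem.List.slice xs (some ((a : Nat) : Int)) (some ((b : Nat) : Int)) = (xs.drop a).take (b - a) := by
  rw [PySem.List.slice_natCast]

-- the x-chunk A appends at window q equals the 12 precomputed block maxima q..q+11
lemma chunkA (data : List Int) (q : Nat) (hq : q < nW data) (acc : List Int) :
    (PySem.List.pyRange 0
        (((PySem.List.slice data (some (10 * (q : Int))) (some (10 * (q : Int) + 120))).length : Int)) 10).foldl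
      (fun x j => x ++ [pyMax (PySem.List.slice
          (PySem.List.slice data (some (10 * (q : Int))) (some (10 * (q : Int) + 120)))
          (some j) (some (j + 10)))]) acc
    = acc ++ chunk data q := by
  have hlen : 10 * q + 121 ≤ data.length := by
    have := hq; unfold nW at this; omega
  have ht : PySem.List.slice data (some (10 * (q : Int))) (some (10 * (q : Int) + 120))
      = (data.drop (10 * q)).take 120 := by
    have h1 : (10 * (q : Int)) = ((10 * q : Nat) : Int) := by push_cast; ring
    have h2 : (10 * (q : Int) + 120) = ((10 * q + 120 : Nat) : Int) := by push_cast; ring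
    rw [h2, h1, slice_nat]
    congr 1
    omega
  rw [ht]
  have htl : ((data.drop (10 * q)).take 120).length = 120 := by
    simp [List.length_take, List.length_drop]
    omega
  rw [htl]
  have h120 : PySem.List.pyRange 0 ((120 : Nat) : Int) 10
      = (List.range 12).map (fun (k : Nat) => 10 * (k : Int)) := by
    rw [pyRange_ten]
    congr 1
  rw [h120, List.foldl_map, PySem.List.foldl_append_singleton_eq_map]
  unfold chunk
  congr 1
  apply List.map_congr_left
  intro r hr
  have hr12 : r < 12 := List.mem_range.mp hr
  have h1 : (10 * (r : Int)) = ((10 * r : Nat) : Int) := by push_cast; ring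
  have h2 : (10 * (r : Int) + 10) = ((10 * r + 10 : Nat) : Int) := by push_cast; ring
  rw [h2, h1, slice_nat]
  unfold bM
  congr 1
  rw [List.drop_take, List.take_take, List.drop_drop]
  congr 1
  · omega
  · congr 1; omega

-- the y-value A appends at window q
lemma yA (data : List Int) (q : Nat) (hq : q < nW data) :
    pyMax (PySem.List.slice data (some (10 * (q : Int) + 120)) (some (10 * (q : Int) + 120 + 2 * 10)))
    = yV data q := by
  have hlen : 10 * q + 121 ≤ data.length := by
    have := hq; unfold nW at this; omega
  have h1 : (10 * (q : Int) + 120) = ((10 * q + 120 : Nat) : Int) := by push_cast; ring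
  have h2 : (10 * (q : Int) + 120 + 2 * 10) = ((10 * q + 140 : Nat) : Int) := by push_cast; ring
  rw [h2, h1, slice_nat]
  have hsub : 10 * q + 140 - (10 * q + 120) = 20 := by omega
  rw [hsub]
  have hsplit : (data.drop (10 * q + 120)).take 20
      = (data.drop (10 * q + 120)).take 10 ++ ((data.drop (10 * q + 120)).drop 10).take 10 := by
    have : (20 : Nat) = 10 + 10 := rfl
    rw [this, List.take_add]
  rw [hsplit, List.drop_drop]
  have ha : (data.drop (10 * q + 120)).take 10 ≠ [] := by
    simp [List.take_eq_nil_iff, List.drop_eq_nil_iff]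
    omega
  have hbm12 : (data.drop (10 * q + 120)).take 10 = (data.drop (10 * (q + 12))).take 10 := by
    rw [show 10 * q + 120 = 10 * (q + 12) from by omega]
  have hbm13 : (data.drop (10 * q + 120 + 10)).take 10 = (data.drop (10 * (q + 13))).take 10 := by
    rw [show 10 * q + 120 + 10 = 10 * (q + 13) from by omega]
  unfold yV
  by_cases hc : 10 * q + 130 < data.length
  · have hb : (data.drop (10 * q + 120 + 10)).take 10 ≠ [] := by
      simp [List.take_eq_nil_iff, List.drop_eq_nil_iff]
      omega
    rw [pyMax_append _ _ ha hb, if_pos hc]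
    unfold bM
    rw [hbm12, hbm13]
  · have hb : (data.drop (10 * q + 120 + 10)).take 10 = [] := by
      have : data.drop (10 * q + 120 + 10) = [] := by
        rw [List.drop_eq_nil_iff]; omega
      rw [this]; rfl
    rw [hb, List.append_nil, if_neg hc]
    unfold bM
    rw [hbm12]

theorem A_eq_ref (data : List Int) : get_x_y data = ref data := by
  unfold get_x_y
  have houter : PySem.List.pyRange 0 ((data.length : Int) - 120) 10
      = (List.range (nW data)).map (fun (q : Nat) => 10 * (q : Int)) := by
    rw [pyRange_ten]
    congr 2
    unfold nW
    omega
  rw [houter, List.foldl_map]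
  rw [foldl_pair _ _ (chunk data) (yV data) ?h]
  · simp [ref]
  case h =>
    intro p q hqmem
    have hq : q < nW data := List.mem_range.mp hqmem
    simp only []
    rw [chunkA data q hq, yA data q hq]

-- m, rewritten as the list of block maxima
lemma m_eq (data : List Int) :
    (PySem.List.pyRange 0 ((data.length : Int)) 10).map
      (fun k => pyMax (PySem.List.slice data (some k) (some (k + 10))))
    = (List.range (nB data)).map (bM data) := by
  rw [pyRange_ten, List.map_map]
  have hn : (((data.length : Int) + 9) / 10).toNat = nB data := by
    unfold nB; omega
  rw [hn]
  apply List.map_congr_left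
  intro k _
  simp only [Function.comp]
  have h1 : (10 * (k : Int)) = ((10 * k : Nat) : Int) := by push_cast; ring
  have h2 : (10 * (k : Int) + 10) = ((10 * k + 10 : Nat) : Int) := by push_cast; ring
  rw [h2, h1, slice_nat]
  unfold bM
  rw [show 10 * k + 10 - 10 * k = 10 from by omega]

lemma getD_range_map (data : List Int) (k : Nat) (hk : k < nB data) :
    ((List.range (nB data)).map (bM data)).getD k 0 = bM data k := by
  rw [List.getD_eq_getElem?_getD]
  simp [hk]

-- the x-chunk B appends at window q
lemma chunkB (data : List Int) (q : Nat) (hq : q < nW data) :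
    PySem.List.slice ((List.range (nB data)).map (bM data)) (some ((q : Nat) : Int)) (some ((q : Int) + 12))
    = chunk data q := by
  have hlen : 10 * q + 121 ≤ data.length := by
    have := hq; unfold nW at this; omega
  have hnb : q + 12 ≤ nB data := by unfold nB; omega
  have h2 : ((q : Int) + 12) = ((q + 12 : Nat) : Int) := by push_cast; ring
  rw [h2, slice_nat]
  have hdec : nB data = q + (nB data - q) := by omega
  rw [hdec, List.range_add, List.map_append, List.drop_append_of_le_length (by simp)]
  have hnil : List.drop q (List.map (bM data) (List.range q)) = [] := by
    apply List.drop_eq_nil_of_le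
    simp
  rw [hnil, List.nil_append, List.map_map, show q + 12 - q = 12 from by omega,
    ← List.map_take, List.take_range, show min 12 (nB data - q) = 12 from by omega]
  unfold chunk
  apply List.map_congr_left
  intro r _
  simp [Function.comp]

-- the y-value B appends at window q
lemma yB (data : List Int) (q : Nat) (hq : q < nW data) :
    (if ((q : Int) + 13 ≥ ((((List.range (nB data)).map (bM data)).length : Nat) : Int))
      then PySem.List.pyGetD ((List.range (nB data)).map (bM data)) ((q : Int) + 12) 0
      else max (PySem.List.pyGetD ((List.range (nB data)).map (bM data)) ((q : Int) + 12) 0)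
               (PySem.List.pyGetD ((List.range (nB data)).map (bM data)) ((q : Int) + 13) 0))
    = yV data q := by
  have hlen : 10 * q + 121 ≤ data.length := by
    have := hq; unfold nW at this; omega
  have hL : (((List.range (nB data)).map (bM data)).length : Nat) = nB data := by simp
  rw [hL]
  have h12 : ((q : Int) + 12) = ((q + 12 : Nat) : Int) := by push_cast; ring
  have h13 : ((q : Int) + 13) = ((q + 13 : Nat) : Int) := by push_cast; ring
  rw [h13, h12, PySem.List.pyGetD_natCast, PySem.List.pyGetD_natCast]
  have hq12 : q + 12 < nB data := by unfold nB; omega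
  unfold yV
  by_cases hc : 10 * q + 130 < data.length
  · have hcond : ¬ (((q + 13 : Nat) : Int) ≥ ((nB data : Nat) : Int)) := by
      unfold nB; push_cast; omega
    have hq13 : q + 13 < nB data := by unfold nB; omega
    rw [if_neg hcond, if_pos hc, getD_range_map data _ hq12, getD_range_map data _ hq13]
  · have hcond : (((q + 13 : Nat) : Int) ≥ ((nB data : Nat) : Int)) := by
      unfold nB; push_cast; omega
    rw [if_pos hcond, if_neg hc, getD_range_map data _ hq12]

theorem B_eq_ref (data : List Int) : get_x_y_alt data = ref data := by
  simp only [get_x_y_alt, m_eq data]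
  have hrange : PySem.List.pyRange 0 (PySem.Int.floordiv ((data.length : Int) - 111) 10) 1
      = (List.range (nW data)).map (fun (q : Nat) => (q : Int)) := by
    rw [PySem.List.pyRange_one]
    congr 1
    · funext k
      simp
    · have hfd : PySem.Int.floordiv ((data.length : Int) - 111) 10
          = ((data.length : Int) - 111) / 10 := by
        simp [PySem.Int.floordiv, Int.fdiv_eq_ediv]
      rw [hfd]
      unfold nW
      congr 1
      omega
  rw [hrange, List.foldl_map]
  rw [foldl_pair _ _ (chunk data) (yV data) ?h]
  · simp [ref]
  case h =>
    intro p q hqmem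
    have hq : q < nW data := List.mem_range.mp hqmem
    rw [chunkB data q hq, yB data q hq]

-- ===== VERDICT (by name: the statement is the Claim_ definition above) =====
theorem get_x_y_spec : Claim_equal_get_x_y := by
  intro data _
  unfold Spec_get_x_y
  rw [A_eq_ref, B_eq_ref]
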